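-- pv_equiv track=rewrite | github.com/exueyuan/dpc_parser_module | mylib/metrics.py | get_match_size
-- ===== SOURCE A (Python) =====
-- from collections import Counter
--
-- def get_match_size(candidate_grams: list, true_grams: list) -> (int, int):
--     total = len(candidate_grams)
--     candidate_counter = Counter(candidate_grams)
--     true_counter = Counter(true_grams)
--     match = 0
--     for gram, count in candidate_counter.items():
--         match += min(count, true_counter[gram])
--     return match, total
-- ===== SOURCE B (Python) =====
-- from collections import Counter
--
-- def get_match_size(candidate_grams: list, true_grams: list) -> (int, int):
--     total = len(candidate_grams)
--     available = Counter(candidate_grams)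
--     match = 0
--     for gram in true_grams:
--         if available[gram] > 0:
--             match += 1
--             available[gram] -= 1
--     return match, total
-- ===== Notes on version B (the rewrite author's own statement) =====
-- stated objective: alternative
-- what changed: Builds one Counter of the candidates and consumes it while scanning the raw true_grams list (budget-decrement loop), instead of building two Counters and summing min(count, other_count) over the candidate counter's items.
import Mathlib
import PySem

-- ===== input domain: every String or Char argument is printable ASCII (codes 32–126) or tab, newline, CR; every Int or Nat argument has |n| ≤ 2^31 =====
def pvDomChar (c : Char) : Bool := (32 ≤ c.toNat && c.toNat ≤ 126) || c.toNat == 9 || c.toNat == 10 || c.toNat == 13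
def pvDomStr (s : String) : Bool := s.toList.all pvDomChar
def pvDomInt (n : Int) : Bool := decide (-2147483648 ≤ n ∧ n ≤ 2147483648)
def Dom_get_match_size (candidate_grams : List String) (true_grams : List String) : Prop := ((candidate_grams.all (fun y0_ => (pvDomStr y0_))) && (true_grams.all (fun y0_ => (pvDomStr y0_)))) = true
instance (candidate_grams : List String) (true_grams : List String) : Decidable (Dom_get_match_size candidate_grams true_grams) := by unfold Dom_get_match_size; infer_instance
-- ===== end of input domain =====

-- B replaces A's two Counters + min-sum over counter items by a single candidate Counter
-- consumed while scanning the raw true_grams list; return values are proved equal.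


-- ===== PORT A =====
def get_match_size (candidate_grams : List String) (true_grams : List String) : Int × Int :=
  let total : Int := candidate_grams.length
  let candidate_counter := PySem.Dict.counter candidate_grams
  let true_counter := PySem.Dict.counter true_grams
  let m := candidate_counter.items.foldl
    (fun m p => m + min p.2 (true_counter.getD p.1 0)) 0
  (m, total)

-- ===== PORT B =====
-- one step of B's consume-budget loop: if the gram still has budget, count it and spend one
def bstep (st : Int × PySem.Dict String Int) (gram : String) : Int × PySem.Dict String Int :=
  if st.2.getD gram 0 > 0 then (st.1 + 1, st.2.modify gram 0 (fun v => v - 1)) else st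

def get_match_size_alt (candidate_grams : List String) (true_grams : List String) : Int × Int :=
  let total : Int := candidate_grams.length
  let st := true_grams.foldl bstep (0, PySem.Dict.counter candidate_grams)
  (st.1, total)

-- ===== PRECONDITION & SPEC =====
def Spec_get_match_size (candidate_grams : List String) (true_grams : List String) (out : Int × Int) : Prop := out = get_match_size_alt candidate_grams true_grams
instance (candidate_grams : List String) (true_grams : List String) (out : Int × Int) : Decidable (Spec_get_match_size candidate_grams true_grams out) := by unfold Spec_get_match_size; infer_instance

-- ===== CLAIM (what is proved, stated in full; the proofs are below) =====
def Claim_equal_get_match_size : Prop := ∀ (candidate_grams : List String) (true_grams : List String), Dom_get_match_size candidate_grams true_grams → Spec_get_match_size candidate_grams true_grams (get_match_size candidate_grams true_grams)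

-- ===== LEMMAS AND PROOFS =====

-- B's loop invariant: over any finite superset s of true_grams' elements, the match counter
-- accumulates the sum of min(available budget, multiplicity in the remaining true list).
lemma bstep_foldl (t : List String) (d : PySem.Dict String Int) (m : Int) (s : Finset String)
    (hs : ∀ g ∈ t, g ∈ s) :
    (t.foldl bstep (m, d)).1
      = m + ∑ k ∈ s, min (max (d.getD k 0) 0) (t.count k : Int) := by
  induction t generalizing d m with
  | nil =>
      simp only [List.foldl_nil, List.count_nil]
      have : ∀ k ∈ s, min (max (d.getD k 0) 0) ((0 : Nat) : Int) = 0 := by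
        intro k _; omega
      rw [Finset.sum_congr rfl this]; simp
  | cons g rest ih =>
      have hg : g ∈ s := hs g (by simp)
      have hrest : ∀ x ∈ rest, x ∈ s := fun x hx => hs x (by simp [hx])
      simp only [List.foldl_cons, bstep]
      by_cases h : d.getD g 0 > 0
      · simp only [h, if_pos]
        rw [ih _ _ hrest]
        have key : ∀ f f' : String → Int,
            (∀ k ∈ s, k ≠ g → f k = f' k) → f g = f' g + 1 →
            ∑ k ∈ s, f k = (∑ k ∈ s, f' k) + 1 := by
          intro f f' hne hgg
          rw [← Finset.add_sum_erase s f hg, ← Finset.add_sum_erase s f' hg, hgg,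
              Finset.sum_congr rfl (fun k hk => hne k (Finset.mem_of_mem_erase hk) (Finset.ne_of_mem_erase hk))]
          ring
        have := key (fun k => min (max (d.getD k 0) 0) (((g :: rest).count k : Nat) : Int))
          (fun k => min (max ((d.modify g 0 (fun v => v - 1)).getD k 0) 0) ((rest.count k : Nat) : Int))
          ?_ ?_
        · simp only at this; omega
        · intro k _ hk
          simp only [PySem.Dict.getD_modify, List.count_cons]
          simp [hk, Ne.symm hk]
        · simp only [PySem.Dict.getD_modify, List.count_cons_self]
          push_cast
          omega
      · simp only [h, ite_false]
        rw [ih _ _ hrest]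
        have : ∀ k ∈ s, min (max (d.getD k 0) 0) (((g :: rest).count k : Nat) : Int)
            = min (max (d.getD k 0) 0) ((rest.count k : Nat) : Int) := by
          intro k _
          by_cases hk : k = g
          · subst hk
            simp only [List.count_cons_self]
            push_cast
            omega
          · simp [List.count_cons, if_neg (Ne.symm hk)]
        rw [Finset.sum_congr rfl this]

-- the common value both programs compute, as a Finset sum
lemma sum_over_superset (c t : List String) (s : Finset String)
    (hc : ∀ g ∈ c, g ∈ s) :
    ∑ k ∈ s, min ((c.count k : Int)) ((t.count k : Int))
      = ∑ k ∈ c.toFinset, min ((c.count k : Int)) ((t.count k : Int)) := by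
  rw [Finset.sum_subset (fun x hx => hc x (List.mem_toFinset.mp hx))]
  intro x _ hx
  have : c.count x = 0 := List.count_eq_zero.mpr (fun hmem => hx (List.mem_toFinset.mpr hmem))
  simp [this]

lemma ofList_toFinset (c : List String) : (PySem.Set.ofList c).toFinset = c.toFinset := by
  ext x
  simp [PySem.Set.mem_ofList]

theorem get_match_size_spec : Claim_equal_get_match_size := by
  intro c t _
  unfold Spec_get_match_size get_match_size get_match_size_alt
  simp only
  refine Prod.ext ?_ rfl
  simp only
  set s : Finset String := c.toFinset ∪ t.toFinset with hsdef
  -- A side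
  have hA : (PySem.Dict.counter c).items.foldl
      (fun m p => m + min p.2 ((PySem.Dict.counter t).getD p.1 0)) 0
      = ∑ k ∈ s, min ((c.count k : Int)) ((t.count k : Int)) := by
    rw [PySem.Dict.items_counter]
    rw [List.foldl_map]
    have : ∀ (l : List String) (m : Int),
        l.foldl (fun m k => m + min ((c.count k : Int)) ((PySem.Dict.counter t).getD k 0)) m
        = m + (l.map (fun k => min ((c.count k : Int)) ((t.count k : Int)))).sum := by
      intro l
      induction l with
      | nil => simp
      | cons x xs ih =>
          intro m
          simp only [List.foldl_cons, List.map_cons, List.sum_cons]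
          rw [PySem.Dict.getD_counter, ih]; ring
    rw [this]
    rw [← List.sum_toFinset _ (PySem.Set.nodup_ofList c), ofList_toFinset]
    rw [sum_over_superset c t s (fun g hg => Finset.mem_union_left _ (List.mem_toFinset.mpr hg))]
    simp
  -- B side
  have hB : (t.foldl bstep (0, PySem.Dict.counter c)).1
      = ∑ k ∈ s, min ((c.count k : Int)) ((t.count k : Int)) := by
    rw [bstep_foldl t _ 0 s (fun g hg => Finset.mem_union_right _ (List.mem_toFinset.mpr hg))]
    rw [Finset.sum_congr rfl (fun k _ => ?_)]
    · ring
    · rw [PySem.Dict.getD_counter]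
      omega
  rw [hA, hB]
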